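-- pv_equiv track=rewrite | github.com/jackye426/carousel-agent | src/carousel_agents_research/experiment.py | _shortcode_from_permalink
-- ===== SOURCE A (Python) =====
-- def _shortcode_from_permalink(url: str) -> str:
--     if not url:
--         return ""
--     parts = url.split("/")
--     for i, p in enumerate(parts):
--         if p in {"p", "reel"} and i + 1 < len(parts):
--             return parts[i + 1]
--     return ""
-- ===== SOURCE B (Python) =====
-- def _shortcode_from_permalink(url: str) -> str:
--     s = url
--     while s:
--         # s starts at a segment boundary
--         if s.startswith("p/"):
--             rest = s[2:]
--         elif s.startswith("reel/"):
--             rest = s[5:]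
--         else:
--             slash = s.find("/")
--             if slash < 0:
--                 return ""
--             s = s[slash + 1:]
--             continue
--         end = rest.find("/")
--         return rest if end < 0 else rest[:end]
--     return ""
-- ===== Notes on version B (the rewrite author's own statement) =====
-- stated objective: alternative
-- what changed: A splits the URL into a token list and scans it with an enumerate loop indexing back into the list; B never splits: it walks the raw string from segment start to segment start, matches the literal prefixes "p/" / "reel/" and slices the following segment out directly, so no intermediate list is built.
import Mathlib
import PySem

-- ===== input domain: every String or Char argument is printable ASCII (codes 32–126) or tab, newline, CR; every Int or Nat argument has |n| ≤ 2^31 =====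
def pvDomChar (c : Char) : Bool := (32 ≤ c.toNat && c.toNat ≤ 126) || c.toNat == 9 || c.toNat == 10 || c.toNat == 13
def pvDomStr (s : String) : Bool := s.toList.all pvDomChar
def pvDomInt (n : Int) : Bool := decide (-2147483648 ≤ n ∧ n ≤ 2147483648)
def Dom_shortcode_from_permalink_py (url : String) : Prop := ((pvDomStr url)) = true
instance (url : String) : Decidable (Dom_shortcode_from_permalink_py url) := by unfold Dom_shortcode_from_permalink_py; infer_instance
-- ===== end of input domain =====

-- B replaces A's split-then-scan-tokens loop by a direct character scan of the string
-- (jump from segment start to segment start, match the literal prefixes "p/" / "reel/",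
-- slice the following segment out); objective: alternative (no split list is built).

-- ===== PORT A =====
-- for i, p in enumerate(parts): if p in {"p","reel"} and i+1 < len(parts): return parts[i+1]
def loopA : List String → String
  | [] => ""
  | p :: rest =>
    if (p == "p" || p == "reel") && !rest.isEmpty then rest.headD "" else loopA rest

def shortcode_from_permalink_py (url : String) : String :=
  if url = "" then ""
  else loopA ((PySem.Chars.splitOn url.toList ['/']).map String.ofList)

-- ===== PORT B =====
-- `rest if end < 0 else rest[:end]` = the chars of rest up to the first '/'
def scanB : List Char → List Char
  | [] => []
  | c :: rest0 =>
    if (c :: rest0).take 2 = ['p', '/'] then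
      ((c :: rest0).drop 2).takeWhile (· ≠ '/')
    else if (c :: rest0).take 5 = ['r', 'e', 'e', 'l', '/'] then
      ((c :: rest0).drop 5).takeWhile (· ≠ '/')
    else
      match h : (c :: rest0).dropWhile (· ≠ '/') with
      | [] => []
      | _ :: rest => scanB rest
termination_by cs => cs.length
decreasing_by
  have h1 : ((c :: rest0).dropWhile (· ≠ '/')).length ≤ (c :: rest0).length :=
    List.length_dropWhile_le _ _
  rw [h] at h1
  simp at h1 ⊢
  omega

def shortcode_from_permalink_py_alt (url : String) : String :=
  String.ofList (scanB url.toList)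

-- ===== PRECONDITION & SPEC =====
def Spec_shortcode_from_permalink_py (url : String) (out : String) : Prop := out = shortcode_from_permalink_py_alt url
instance (url : String) (out : String) : Decidable (Spec_shortcode_from_permalink_py url out) := by unfold Spec_shortcode_from_permalink_py; infer_instance

-- ===== CLAIM (what is proved, stated in full; the proofs are below) =====
def Claim_equal_shortcode_from_permalink_py : Prop := ∀ (url : String), Dom_shortcode_from_permalink_py url → Spec_shortcode_from_permalink_py url (shortcode_from_permalink_py url)

-- ===== LEMMAS AND PROOFS =====

-- a simple structural characterisation of PySem.Chars.splitOn on a one-char separator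
def prepSeg (p : List Char) : List (List Char) → List (List Char)
  | [] => [p]
  | x :: xs => (p ++ x) :: xs

def simpleSplit : List Char → List (List Char)
  | [] => [[]]
  | c :: rest => if c = '/' then [] :: simpleSplit rest else prepSeg [c] (simpleSplit rest)

theorem simpleSplit_ne_nil (l : List Char) : simpleSplit l ≠ [] := by
  cases l with
  | nil => simp [simpleSplit]
  | cons c rest =>
    simp only [simpleSplit]
    split_ifs
    · simp
    · cases h : simpleSplit rest <;> simp [prepSeg]

theorem prepSeg_nil (xs : List (List Char)) (h : xs ≠ []) : prepSeg [] xs = xs := by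
  cases xs with
  | nil => exact absurd rfl h
  | cons x t => simp [prepSeg]

theorem prepSeg_prepSeg (a b : List Char) (xs : List (List Char)) :
    prepSeg a (prepSeg b xs) = prepSeg (a ++ b) xs := by
  cases xs <;> simp [prepSeg]

theorem go_char (fuel : Nat) : ∀ (l cur : List Char) (acc : List (List Char)),
    l.length < fuel →
    PySem.Chars.splitOn.go ['/'] fuel l cur acc
      = acc.reverse ++ prepSeg cur.reverse (simpleSplit l) := by
  induction fuel with
  | zero => intro l cur acc h; omega
  | succ f ih =>
    intro l cur acc h
    cases l with
    | nil => simp [PySem.Chars.splitOn.go, simpleSplit, prepSeg]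
    | cons c rest =>
      simp only [PySem.Chars.splitOn.go]
      by_cases hc : c = '/'
      · subst hc
        have hpre : List.isPrefixOf ['/'] ('/' :: rest) = true := by
          simp [List.isPrefixOf]
        rw [if_pos hpre]
        simp only [List.length_cons, List.length_nil, List.drop_succ_cons, List.drop_zero]
        rw [ih rest [] (cur.reverse :: acc) (by simp at h; omega)]
        simp only [List.reverse_nil]
        rw [prepSeg_nil _ (simpleSplit_ne_nil rest)]
        simp [simpleSplit, prepSeg]
      · have hpre : List.isPrefixOf ['/'] (c :: rest) = false := by
          simp [List.isPrefixOf]; exact fun hh => absurd hh.symm hc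
        rw [if_neg (by simp [hpre])]
        rw [ih rest (c :: cur) acc (by simp at h; omega)]
        simp only [simpleSplit, if_neg hc, List.reverse_cons]
        rw [prepSeg_prepSeg]

theorem splitOn_char (cs : List Char) :
    PySem.Chars.splitOn cs ['/'] = simpleSplit cs := by
  unfold PySem.Chars.splitOn
  rw [go_char (cs.length + 1) cs [] [] (by omega)]
  simp [prepSeg_nil _ (simpleSplit_ne_nil cs)]

theorem simpleSplit_headD (l : List Char) :
    (simpleSplit l).headD [] = l.takeWhile (· ≠ '/') := by
  induction l with
  | nil => simp [simpleSplit]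
  | cons c rest ih =>
    simp only [simpleSplit]
    by_cases hc : c = '/'
    · simp [hc]
    · rw [if_neg hc]
      cases h : simpleSplit rest with
      | nil => exact absurd h (simpleSplit_ne_nil rest)
      | cons x xs =>
        rw [h] at ih
        simp only [List.headD_cons] at ih
        simp [prepSeg, List.takeWhile, hc]
        simpa using ih

theorem simpleSplit_seg (seg : List Char) (h : '/' ∉ seg) :
    simpleSplit seg = [seg] := by
  induction seg with
  | nil => simp [simpleSplit]
  | cons c rest ih =>
    simp only [List.mem_cons, not_or] at h
    have hc : ¬ c = '/' := fun hh => h.1 hh.symm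
    simp [simpleSplit, hc, ih h.2, prepSeg]

theorem simpleSplit_append (seg rest : List Char) (h : '/' ∉ seg) :
    simpleSplit (seg ++ '/' :: rest) = seg :: simpleSplit rest := by
  induction seg with
  | nil => simp [simpleSplit]
  | cons c s ih =>
    simp only [List.mem_cons, not_or] at h
    have hc : ¬ c = '/' := fun hh => h.1 hh.symm
    simp only [List.cons_append, simpleSplit, if_neg hc, ih h.2]
    simp [prepSeg]

theorem ofList_eq_lit (l l' : List Char) : (String.ofList l == String.ofList l') = (l == l') := by
  by_cases h : l = l'
  · simp [h]
  · have hne : String.ofList l ≠ String.ofList l' :=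
      fun hc => h (by simpa using congrArg String.toList hc)
    simp [h, hne]

theorem dropWhile_seg (seg rest : List Char) (h : '/' ∉ seg) :
    (seg ++ '/' :: rest).dropWhile (fun c => c ≠ '/') = '/' :: rest := by
  induction seg with
  | nil => simp
  | cons c s ih =>
    simp only [List.mem_cons, not_or] at h
    have hc : ¬ c = '/' := fun hh => h.1 hh.symm
    simp only [List.cons_append, List.dropWhile_cons]
    simp only [hc, ne_eq, not_false_eq_true, decide_true, if_true]
    exact ih h.2

theorem take2_ne (seg rest : List Char) (h : '/' ∉ seg) (hp : seg ≠ ['p']) :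
    (seg ++ '/' :: rest).take 2 ≠ ['p', '/'] := by
  rcases seg with _ | ⟨a, _ | ⟨b, s⟩⟩ <;> intro hh <;> simp at hh
  · exact hp (by rw [hh])
  · exact h (by simp [hh.2])

theorem take5_ne (seg rest : List Char) (h : '/' ∉ seg) (hr : seg ≠ ['r', 'e', 'e', 'l']) :
    (seg ++ '/' :: rest).take 5 ≠ ['r', 'e', 'e', 'l', '/'] := by
  rcases seg with _ | ⟨a, _ | ⟨b, _ | ⟨c, _ | ⟨d, _ | ⟨e, s⟩⟩⟩⟩⟩ <;> intro hh <;> simp at hh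
  · exact hr (by simp [hh.1, hh.2.1, hh.2.2.1, hh.2.2.2])
  · exact h (by simp [hh.2.2.2.2])

theorem loopA_hit (seg : List Char) (rest : List Char)
    (hcond : (String.ofList seg == "p" || String.ofList seg == "reel") = true) :
    loopA ((seg :: simpleSplit rest).map String.ofList)
      = String.ofList (rest.takeWhile (· ≠ '/')) := by
  simp only [List.map_cons, loopA]
  cases h : simpleSplit rest with
  | nil => exact absurd h (simpleSplit_ne_nil rest)
  | cons x xs =>
    have hhd := simpleSplit_headD rest
    rw [h] at hhd
    simp only [List.headD_cons] at hhd
    simp [hcond, hhd]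

theorem main_lemma : ∀ (n : Nat) (cs : List Char), cs.length ≤ n →
    loopA ((simpleSplit cs).map String.ofList) = String.ofList (scanB cs) := by
  intro n
  induction n with
  | zero =>
    intro cs hlen
    have hnil : cs = [] := by cases cs <;> simp_all
    subst hnil
    simp [simpleSplit, loopA, scanB]
  | succ n ih =>
    intro cs hlen
    have hsplit := List.takeWhile_append_dropWhile (p := (fun c => c ≠ '/')) (l := cs)
    have hnoslash : '/' ∉ cs.takeWhile (fun c => c ≠ '/') := by
      intro hm
      have := List.mem_takeWhile_imp hm
      simp at this
    cases hdw : cs.dropWhile (fun c => c ≠ '/') with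
    | nil =>
      have hcs : cs = cs.takeWhile (fun c => c ≠ '/') := by
        conv_lhs => rw [← hsplit]
        rw [hdw, List.append_nil]
      have hns : '/' ∉ cs := fun hm => hnoslash (hcs ▸ hm)
      rw [simpleSplit_seg cs hns]
      cases cs with
      | nil => simp [loopA, scanB]
      | cons c rest0 =>
        rw [scanB]
        have h2 : (c :: rest0).take 2 ≠ ['p', '/'] := by
          intro hh
          exact hns (List.take_subset 2 _ (by rw [hh]; simp))
        have h5 : (c :: rest0).take 5 ≠ ['r', 'e', 'e', 'l', '/'] := by
          intro hh
          exact hns (List.take_subset 5 _ (by rw [hh]; simp))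
        rw [if_neg h2, if_neg h5]
        split
        · simp [loopA]
        · rename_i x rest' heq
          rw [hdw] at heq
          simp at heq
    | cons d rest =>
      have hd : d = '/' := by
        have := List.head?_dropWhile_not (p := fun c => c ≠ '/') (l := cs)
        rw [hdw] at this
        simpa using this
      subst hd
      obtain ⟨seg, hnos, hcs⟩ : ∃ seg, '/' ∉ seg ∧ cs = seg ++ '/' :: rest :=
        ⟨_, hnoslash, by conv_lhs => rw [← hsplit, hdw]⟩
      have hrest_len : rest.length ≤ n := by
        have : cs.length = seg.length + 1 + rest.length := by
          rw [hcs]; simp only [List.length_append, List.length_cons]; omega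
        omega
      rw [hcs, simpleSplit_append seg rest hnos]
      by_cases hp : seg = ['p']
      · subst hp
        rw [loopA_hit _ _ (by simp)]
        simp only [List.cons_append, List.nil_append]
        rw [scanB, if_pos (by simp)]
        simp
      · by_cases hr : seg = ['r', 'e', 'e', 'l']
        · subst hr
          rw [loopA_hit _ _ (by simp)]
          simp only [List.cons_append, List.nil_append]
          rw [scanB, if_neg (by simp), if_pos (by simp)]
          simp
        · have hcond : ((String.ofList seg == "p" || String.ofList seg == "reel")
              && !((simpleSplit rest).map String.ofList).isEmpty) = false := by
            have e1 : (String.ofList seg == "p") = false := by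
              have hlit : "p" = String.ofList ['p'] := rfl
              rw [hlit, ofList_eq_lit]
              simpa using hp
            have e2 : (String.ofList seg == "reel") = false := by
              have hlit : "reel" = String.ofList ['r', 'e', 'e', 'l'] := rfl
              rw [hlit, ofList_eq_lit]
              simpa using hr
            simp [e1, e2]
          have hdw2 : (seg ++ '/' :: rest).dropWhile (fun c => c ≠ '/') = '/' :: rest :=
            dropWhile_seg seg rest hnos
          cases hsegcs : seg ++ '/' :: rest with
          | nil => simp at hsegcs
          | cons c0 cs0 =>
            rw [scanB]
            rw [if_neg (hsegcs ▸ take2_ne seg rest hnos hp),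
                if_neg (hsegcs ▸ take5_ne seg rest hnos hr)]
            rw [hsegcs] at hdw2
            split
            · rename_i heq
              rw [hdw2] at heq
              simp at heq
            · rename_i x rest' heq
              rw [hdw2] at heq
              injection heq with h1 h2
              subst h2
              simp only [List.map_cons, loopA, hcond, Bool.false_eq_true, if_false]
              exact ih rest hrest_len

-- ===== VERDICT (by name: the statement is the Claim_ definition above) =====
theorem shortcode_from_permalink_py_spec : Claim_equal_shortcode_from_permalink_py := by
  intro url _
  unfold Spec_shortcode_from_permalink_py shortcode_from_permalink_py shortcode_from_permalink_py_alt
  split_ifs with h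
  · subst h
    rw [show ("" : String).toList = [] from rfl, scanB]
  · rw [splitOn_char]
    exact main_lemma url.toList.length url.toList le_rfl
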